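-- pv_equiv track=rewrite | github.com/ra1nb0rn/search_vulns | src/search_vulns/modules/linux_distro_backpatches/redhat/build.py | get_unified_fixed_version
-- ===== SOURCE A (Python) =====
-- def get_unified_fixed_version(fixed_version, unified_dot_count):
--     unified_fixed_version = ""
--     cur_dot_count = 0
--     for char in fixed_version:
--         if char.isalnum() or cur_dot_count >= unified_dot_count:
--             unified_fixed_version += char
--         elif char == ".":
--             unified_fixed_version += char
--             cur_dot_count += 1
--         elif char in ("-", "_", "+"):
--             unified_fixed_version += "."
--             cur_dot_count += 1
--         else:
--             unified_fixed_version += char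
--
--     return unified_fixed_version
-- ===== SOURCE B (Python) =====
-- def get_unified_fixed_version(fixed_version, unified_dot_count):
--     # Pass 1: find boundary k = index just past the separator that makes the
--     # running separator count reach unified_dot_count (len if never reached,
--     # 0 if the limit is already <= 0).
--     k = 0
--     if unified_dot_count > 0:
--         k = len(fixed_version)
--         cnt = 0
--         for i, ch in enumerate(fixed_version):
--             if ch in ".-_+":
--                 cnt += 1
--                 if cnt >= unified_dot_count:
--                     k = i + 1
--                     break
--     # Pass 2: translate -, _, + to . in the prefix, copy the suffix verbatim.
--     prefix = fixed_version[:k]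
--     return ''.join('.' if ch in "-_+" else ch for ch in prefix) + fixed_version[k:]
-- ===== Notes on version B (the rewrite author's own statement) =====
-- stated objective: alternative
-- what changed: Replaces A's single stateful counting loop (append char-by-char with a running dot count) by a boundary-finding pass that locates the index after the separator reaching the limit, then a slice-and-translate: translate -/_/+ to . in the prefix and append the suffix verbatim.
import Mathlib
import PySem

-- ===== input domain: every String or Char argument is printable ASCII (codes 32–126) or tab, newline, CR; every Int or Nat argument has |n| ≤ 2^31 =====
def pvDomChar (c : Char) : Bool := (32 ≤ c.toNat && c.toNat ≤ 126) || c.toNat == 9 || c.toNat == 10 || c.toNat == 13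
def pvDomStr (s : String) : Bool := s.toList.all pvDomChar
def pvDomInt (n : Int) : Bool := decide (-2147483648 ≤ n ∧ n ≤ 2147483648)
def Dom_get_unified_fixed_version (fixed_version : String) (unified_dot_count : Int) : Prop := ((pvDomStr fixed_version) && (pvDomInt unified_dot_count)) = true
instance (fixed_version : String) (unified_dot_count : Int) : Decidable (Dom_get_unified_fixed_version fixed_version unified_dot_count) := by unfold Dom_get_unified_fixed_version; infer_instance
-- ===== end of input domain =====

-- B replaces A's single stateful counting loop by a boundary-finding pass plus a
-- slice-and-translate pass (same O(n) cost; a different decomposition).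


-- ===== PORT A =====
-- A: one loop over the characters, appending to the output string and keeping
-- a running separator count; the first `unified_dot_count` separators are
-- normalized ('.' kept, '-'/'_'/'+' turned into '.'), everything after passes through.
def get_unified_fixed_version (fixed_version : String) (unified_dot_count : Int) : String :=
  let r := fixed_version.toList.foldl
    (fun (st : List Char × Int) char =>
      if PySem.Chars.isalnum char = true ∨ st.2 ≥ unified_dot_count then
        (st.1 ++ [char], st.2)
      else if char = '.' then
        (st.1 ++ [char], st.2 + 1)
      else if char = '-' ∨ char = '_' ∨ char = '+' then
        (st.1 ++ ['.'], st.2 + 1)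
      else
        (st.1 ++ [char], st.2))
    (([] : List Char), (0 : Int))
  String.mk r.1

-- ===== PORT B =====
def pvIsSep (c : Char) : Bool := c = '.' || c = '-' || c = '_' || c = '+'

-- pvFindK cs need = index just past the separator at which the running count reaches need
-- (cs.length if never reached); B's first pass.
def pvFindK : List Char → Int → Nat
  | [], _ => 0
  | c :: rest, need =>
    if pvIsSep c then
      (if need ≤ 1 then 1 else 1 + pvFindK rest (need - 1))
    else 1 + pvFindK rest need

def pvRepl (c : Char) : Char := if c = '-' ∨ c = '_' ∨ c = '+' then '.' else c

def get_unified_fixed_version_alt (fixed_version : String) (unified_dot_count : Int) : String :=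
  let cs := fixed_version.toList
  let k := if unified_dot_count > 0 then pvFindK cs unified_dot_count else 0
  String.mk ((cs.take k).map pvRepl ++ cs.drop k)

-- ===== PRECONDITION & SPEC =====
def Spec_get_unified_fixed_version (fixed_version : String) (unified_dot_count : Int) (out : String) : Prop := out = get_unified_fixed_version_alt fixed_version unified_dot_count
instance (fixed_version : String) (unified_dot_count : Int) (out : String) : Decidable (Spec_get_unified_fixed_version fixed_version unified_dot_count out) := by unfold Spec_get_unified_fixed_version; infer_instance

-- ===== CLAIM (what is proved, stated in full; the proofs are below) =====
def Claim_equal_get_unified_fixed_version : Prop := ∀ (fixed_version : String) (unified_dot_count : Int), Dom_get_unified_fixed_version fixed_version unified_dot_count → Spec_get_unified_fixed_version fixed_version unified_dot_count (get_unified_fixed_version fixed_version unified_dot_count)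

-- ===== LEMMAS AND PROOFS =====

-- the output characters produced by A's loop from separator count `cnt` on
def pvGoA (u : Int) : List Char → Int → List Char
  | [], _ => []
  | c :: rest, cnt =>
    if PySem.Chars.isalnum c = true ∨ cnt ≥ u then c :: pvGoA u rest cnt
    else if c = '.' then c :: pvGoA u rest (cnt + 1)
    else if c = '-' ∨ c = '_' ∨ c = '+' then '.' :: pvGoA u rest (cnt + 1)
    else c :: pvGoA u rest cnt

-- B's boundary, totalized for nonpositive need
def pvK (cs : List Char) (need : Int) : Nat := if 0 < need then pvFindK cs need else 0

lemma isalnum_sep_false {c : Char} (h : pvIsSep c = true) : PySem.Chars.isalnum c = false := by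
  simp [pvIsSep] at h
  rcases h with ((h | h) | h) | h <;> subst h <;> decide

lemma foldl_fst (u : Int) (cs : List Char) (acc : List Char) (cnt : Int) :
    (cs.foldl
      (fun (st : List Char × Int) char =>
        if PySem.Chars.isalnum char = true ∨ st.2 ≥ u then
          (st.1 ++ [char], st.2)
        else if char = '.' then
          (st.1 ++ [char], st.2 + 1)
        else if char = '-' ∨ char = '_' ∨ char = '+' then
          (st.1 ++ ['.'], st.2 + 1)
        else
          (st.1 ++ [char], st.2)) (acc, cnt)).1 = acc ++ pvGoA u cs cnt := by
  induction cs generalizing acc cnt with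
  | nil => simp [pvGoA]
  | cons c rest ih =>
    simp only [List.foldl_cons, pvGoA]
    split_ifs with h1 h2 h3 <;> simp [ih]

lemma goA_eq (u : Int) (cs : List Char) (cnt : Int) :
    pvGoA u cs cnt =
      (cs.take (pvK cs (u - cnt))).map pvRepl ++ cs.drop (pvK cs (u - cnt)) := by
  induction cs generalizing cnt with
  | nil => simp [pvGoA]
  | cons c rest ih =>
    by_cases hge : cnt ≥ u
    · have h0 : pvK (c :: rest) (u - cnt) = 0 := by unfold pvK; rw [if_neg (by omega)]
      have h0' : pvK rest (u - cnt) = 0 := by unfold pvK; rw [if_neg (by omega)]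
      have ihr := ih cnt
      rw [h0'] at ihr
      simp [pvGoA, hge, h0, ihr]
    · have hlt : 0 < u - cnt := by omega
      by_cases hsep : pvIsSep c = true
      · have halnum := isalnum_sep_false hsep
        have hK : pvK (c :: rest) (u - cnt) =
            (if u - cnt ≤ 1 then 1 else 1 + pvFindK rest (u - cnt - 1)) := by
          unfold pvK; rw [if_pos hlt]; simp [pvFindK, hsep]
        by_cases hone : u - cnt ≤ 1
        · have hK1 : pvK (c :: rest) (u - cnt) = 1 := by rw [hK]; simp [hone]
          have h0' : pvK rest (u - (cnt + 1)) = 0 := by unfold pvK; rw [if_neg (by omega)]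
          have ihr := ih (cnt + 1)
          rw [h0'] at ihr
          simp only [pvIsSep, Bool.or_eq_true, decide_eq_true_eq] at hsep
          rcases hsep with ((h | h) | h) | h <;> subst h <;>
            simp [pvGoA, halnum, hge, hK1, ihr, pvRepl]
        · have hK2 : pvK (c :: rest) (u - cnt) = 1 + pvFindK rest (u - cnt - 1) := by
            rw [hK]; simp [hone]
          have hKr : pvK rest (u - (cnt + 1)) = pvFindK rest (u - cnt - 1) := by
            have he : u - (cnt + 1) = u - cnt - 1 := by ring
            rw [he]; unfold pvK; rw [if_pos (by omega)]
          have ihr := ih (cnt + 1)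
          rw [hKr] at ihr
          simp only [pvIsSep, Bool.or_eq_true, decide_eq_true_eq] at hsep
          rcases hsep with ((h | h) | h) | h <;> subst h <;>
            simp [pvGoA, halnum, hge, hK2, ihr, pvRepl,
              Nat.add_comm 1 (pvFindK rest (u - cnt - 1)), List.take_succ_cons,
              List.drop_succ_cons]
      · have hK : pvK (c :: rest) (u - cnt) = 1 + pvFindK rest (u - cnt) := by
          unfold pvK; rw [if_pos hlt]; simp [pvFindK, hsep]
        have hKr : pvK rest (u - cnt) = pvFindK rest (u - cnt) := by
          unfold pvK; rw [if_pos hlt]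
        have ihr := ih cnt
        rw [hKr] at ihr
        simp only [pvIsSep, Bool.or_eq_true, decide_eq_true_eq, not_or] at hsep
        obtain ⟨⟨⟨h1, h2⟩, h3⟩, h4⟩ := hsep
        have hns : ¬ (c = '-' ∨ c = '_' ∨ c = '+') := by tauto
        have hrc : pvRepl c = c := by simp [pvRepl, hns]
        by_cases han : PySem.Chars.isalnum c = true <;>
          simp [pvGoA, han, hge, h1, hns, hK, ihr, hrc,
            Nat.add_comm 1 (pvFindK rest (u - cnt)), List.take_succ_cons,
            List.drop_succ_cons]

-- ===== VERDICT (by name: the statement is the Claim_ definition above) =====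
theorem get_unified_fixed_version_spec : Claim_equal_get_unified_fixed_version := by
  intro fv u _
  unfold Spec_get_unified_fixed_version get_unified_fixed_version get_unified_fixed_version_alt
  simp only
  rw [foldl_fst u fv.toList [] 0, goA_eq]
  have : pvK fv.toList (u - 0) = if u > 0 then pvFindK fv.toList u else 0 := by
    simp [pvK]
  rw [this]
  simp only [List.nil_append]
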